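-- pv_equiv track=rewrite | github.com/licekto/challenges | foobar/Level-3/03-queue-to-do/solution_3_3.py | solution
-- ===== SOURCE A (Python) =====
-- def fast_xor(n):
--     mod = n % 4
--     if mod == 0:
--         return n
--     if mod == 1:
--         return 1
--     if mod == 2:
--         return n + 1
--     return 0
--
-- def solution(start, length):
--     res = 0
--     current_row = length
--     while current_row > 0:
--         res ^= fast_xor(start - 1) ^ fast_xor(start + current_row - 1)
--         start += length
--         current_row -= 1
--     return res
-- ===== SOURCE B (Python) =====
-- def ap_xor(c, d, m):
--     # XOR of the arithmetic progression c, c+d, ..., c+(m-1)*d, by recursive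
--     # bit-splitting: for even d all terms share their low bit, so XOR the
--     # halved progression and re-attach the bit; for odd d split the terms by
--     # index parity into two progressions of even step 2*d.
--     if m <= 0:
--         return 0
--     if m == 1:
--         return c
--     if d == 0:
--         return c if m % 2 == 1 else 0
--     if d % 2 == 1:
--         return ap_xor(c, 2 * d, (m + 1) // 2) ^ ap_xor(c + d, 2 * d, m // 2)
--     return 2 * ap_xor(c // 2, d // 2, m) + (c % 2) * (m % 2)
--
-- def fxor_ap(c, d, m):
--     # XOR of prefix(c + r*d) for r in range(m), where prefix(n) = 0^1^...^n
--     # (= n, 1, n+1, 0 as n % 4 = 0, 1, 2, 3).  Once the step is divisible by 4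
--     # the residue class is constant along the progression and each case is an
--     # index-parity count or a plain ap_xor; otherwise split by index parity.
--     if m <= 0:
--         return 0
--     if d % 4 == 0:
--         mod = c % 4
--         if mod == 0:
--             return ap_xor(c, d, m)
--         if mod == 1:
--             return m % 2
--         if mod == 2:
--             return ap_xor(c + 1, d, m)
--         return 0
--     return fxor_ap(c, 2 * d, (m + 1) // 2) ^ fxor_ap(c + d, 2 * d, m // 2)
--
-- def solution(start, length):
--     # Row r of the staircase is the range [start + r*length, start + r*length
--     # + (length - r) - 1]; its XOR is prefix(upper) ^ prefix(lower - 1), and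
--     # the lower-1 and upper endpoints each form an arithmetic progression over
--     # the rows, so the whole answer is two fxor_ap calls.
--     return fxor_ap(start - 1, length, length) ^ fxor_ap(start + length - 1, length - 1, length)
-- ===== Notes on version B (the rewrite author's own statement) =====
-- stated objective: alternative
-- what changed: B has no row loop and no per-row closed form: it reduces the staircase to the two arithmetic progressions of row boundary points and computes the XOR of prefix-XOR values over each progression by recursive index-parity splitting and low-bit peeling of the progression.
import Mathlib
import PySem

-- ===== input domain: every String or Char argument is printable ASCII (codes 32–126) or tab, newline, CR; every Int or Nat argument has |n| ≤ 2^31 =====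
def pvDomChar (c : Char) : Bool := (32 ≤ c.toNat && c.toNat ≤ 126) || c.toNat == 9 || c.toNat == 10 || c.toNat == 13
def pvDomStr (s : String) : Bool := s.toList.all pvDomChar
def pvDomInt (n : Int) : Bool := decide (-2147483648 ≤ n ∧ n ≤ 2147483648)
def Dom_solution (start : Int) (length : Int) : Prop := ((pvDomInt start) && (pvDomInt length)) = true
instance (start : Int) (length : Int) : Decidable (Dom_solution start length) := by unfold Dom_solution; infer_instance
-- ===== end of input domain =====

-- B replaces A's row loop (closed-form prefix-XOR per shrinking row) by recursive
-- bit-splitting XOR over the two arithmetic progressions of row boundaries.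

-- ===== PORT A =====
def fastXor (n : Int) : Int :=
  let m := PySem.Int.mod n 4
  if m = 0 then n
  else if m = 1 then 1
  else if m = 2 then n + 1
  else 0

def solutionLoopA (length res start current_row : Int) : Int :=
  if 0 < current_row then
    solutionLoopA length
      (PySem.Int.bxor res (PySem.Int.bxor (fastXor (start - 1)) (fastXor (start + current_row - 1))))
      (start + length) (current_row - 1)
  else res
termination_by current_row.toNat
decreasing_by omega

def solution (start : Int) (length : Int) : Int :=
  solutionLoopA length 0 start length

-- ===== PORT B =====
-- facts about Python's // and % with positive divisor, cited by the ports' termination proofs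
theorem pymod_two (a : Int) : PySem.Int.mod a 2 = a % 2 :=
  PySem.Int.mod_eq_emod_of_pos (by norm_num)
theorem pymod_four (a : Int) : PySem.Int.mod a 4 = a % 4 :=
  PySem.Int.mod_eq_emod_of_pos (by norm_num)
theorem pyfd_two (a : Int) : PySem.Int.floordiv a 2 = a / 2 :=
  PySem.Int.floordiv_eq_ediv_of_pos (by norm_num)

-- the termination lemmas the two recursive ports cite in their decreasing_by
theorem apXor_dec1 (m : Int) (h1 : ¬ m ≤ 0) (h2 : ¬ m = 1) :
    (PySem.Int.floordiv (m + 1) 2).toNat < m.toNat := by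
  rw [pyfd_two]; omega
theorem apXor_dec2 (m : Int) (h1 : ¬ m ≤ 0) (h2 : ¬ m = 1) :
    (PySem.Int.floordiv m 2).toNat < m.toNat := by
  rw [pyfd_two]; omega
theorem apXor_dec3 (d : Int) (h3 : ¬ d = 0) (h4 : ¬ PySem.Int.mod d 2 = 1) :
    (PySem.Int.floordiv d 2).natAbs < d.natAbs := by
  rw [pyfd_two]; rw [pymod_two] at h4; omega
theorem fxorAp_dec1 (d m : Int) (h1 : ¬ m ≤ 0) (h2 : ¬ PySem.Int.mod d 4 = 0) :
    3 * (PySem.Int.floordiv (m + 1) 2).toNat +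
      (if PySem.Int.mod (2 * d) 2 = 1 then 2 else if PySem.Int.mod (2 * d) 4 = 0 then 0 else 1) <
    3 * m.toNat + (if PySem.Int.mod d 2 = 1 then 2 else if PySem.Int.mod d 4 = 0 then 0 else 1) := by
  rw [pyfd_two, pymod_two, pymod_two, pymod_four, pymod_four]
  rw [pymod_four] at h2
  split_ifs <;> omega
theorem fxorAp_dec2 (d m : Int) (h1 : ¬ m ≤ 0) (h2 : ¬ PySem.Int.mod d 4 = 0) :
    3 * (PySem.Int.floordiv m 2).toNat +
      (if PySem.Int.mod (2 * d) 2 = 1 then 2 else if PySem.Int.mod (2 * d) 4 = 0 then 0 else 1) <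
    3 * m.toNat + (if PySem.Int.mod d 2 = 1 then 2 else if PySem.Int.mod d 4 = 0 then 0 else 1) := by
  rw [pyfd_two, pymod_two, pymod_two, pymod_four, pymod_four]
  rw [pymod_four] at h2
  split_ifs <;> omega

-- XOR of the AP c, c+d, …, c+(m-1)d by recursive bit-splitting (port of Source B ap_xor)
def apXor (c d m : Int) : Int :=
  if m ≤ 0 then 0
  else if m = 1 then c
  else if d = 0 then (if PySem.Int.mod m 2 = 1 then c else 0)
  else if PySem.Int.mod d 2 = 1 then
    PySem.Int.bxor (apXor c (2 * d) (PySem.Int.floordiv (m + 1) 2))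
                   (apXor (c + d) (2 * d) (PySem.Int.floordiv m 2))
  else
    2 * apXor (PySem.Int.floordiv c 2) (PySem.Int.floordiv d 2) m
      + PySem.Int.mod c 2 * PySem.Int.mod m 2
termination_by (m.toNat, d.natAbs)
decreasing_by
  · exact Prod.Lex.left _ _ (apXor_dec1 m ‹_› ‹_›)
  · exact Prod.Lex.left _ _ (apXor_dec2 m ‹_› ‹_›)
  · exact Prod.Lex.right' _ (Nat.le_refl _) (apXor_dec3 d ‹_› ‹_›)

-- XOR of prefix(c + r*d) for r in range(m), prefix(n) = 0^1^…^n (port of Source B fxor_ap)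
def fxorAp (c d m : Int) : Int :=
  if m ≤ 0 then 0
  else if PySem.Int.mod d 4 = 0 then
    let md := PySem.Int.mod c 4
    if md = 0 then apXor c d m
    else if md = 1 then PySem.Int.mod m 2
    else if md = 2 then apXor (c + 1) d m
    else 0
  else
    PySem.Int.bxor (fxorAp c (2 * d) (PySem.Int.floordiv (m + 1) 2))
                   (fxorAp (c + d) (2 * d) (PySem.Int.floordiv m 2))
termination_by 3 * m.toNat +
  (if PySem.Int.mod d 2 = 1 then 2 else if PySem.Int.mod d 4 = 0 then 0 else 1)
decreasing_by
  · exact fxorAp_dec1 d m ‹_› ‹_›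
  · exact fxorAp_dec2 d m ‹_› ‹_›

def solution_alt (start : Int) (length : Int) : Int :=
  PySem.Int.bxor (fxorAp (start - 1) length length)
                 (fxorAp (start + length - 1) (length - 1) length)

-- ===== PRECONDITION & SPEC =====
def Spec_solution (start : Int) (length : Int) (out : Int) : Prop := out = solution_alt start length
instance (start : Int) (length : Int) (out : Int) : Decidable (Spec_solution start length out) := by unfold Spec_solution; infer_instance

-- ===== CLAIM (what is proved, stated in full; the proofs are below) =====
def Claim_equal_solution : Prop := ∀ (start : Int) (length : Int), Dom_solution start length → Spec_solution start length (solution start length)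

-- ===== LEMMAS AND PROOFS =====

-- PySem.Int.bxor on the two Int constructors
theorem bxor_negSucc_negSucc (m n : Nat) :
    PySem.Int.bxor (Int.negSucc m) (Int.negSucc n) = ((m ^^^ n : Nat) : Int) := by
  have hm : ¬ (0 : Int) ≤ Int.negSucc m := by omega
  have hn : ¬ (0 : Int) ≤ Int.negSucc n := by omega
  simp only [PySem.Int.bxor, hm, hn, if_false]
  have h1 : (-Int.negSucc m - 1).toNat = m := by omega
  have h2 : (-Int.negSucc n - 1).toNat = n := by omega
  rw [h1, h2]

theorem bxor_ofNat_negSucc (m n : Nat) :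
    PySem.Int.bxor (m : Int) (Int.negSucc n) = Int.negSucc (m ^^^ n) := by
  have hm : (0 : Int) ≤ (m : Int) := by omega
  have hn : ¬ (0 : Int) ≤ Int.negSucc n := by omega
  simp only [PySem.Int.bxor, hm, hn, if_true, if_false]
  have h1 : (-(Int.negSucc n) - 1).toNat = n := by omega
  have h2 : ((m : Int)).toNat = m := by omega
  rw [h1, h2]
  omega

theorem bxor_negSucc_ofNat (m n : Nat) :
    PySem.Int.bxor (Int.negSucc m) (n : Int) = Int.negSucc (m ^^^ n) := by
  rw [PySem.Int.bxor_comm, bxor_ofNat_negSucc, Nat.xor_comm]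

theorem bxor_assoc (a b c : Int) :
    PySem.Int.bxor (PySem.Int.bxor a b) c = PySem.Int.bxor a (PySem.Int.bxor b c) := by
  rcases a with m | m <;> rcases b with n | n <;> rcases c with k | k <;>
    simp only [Int.ofNat_eq_natCast, PySem.Int.bxor_natCast, bxor_negSucc_negSucc,
      bxor_ofNat_negSucc, bxor_negSucc_ofNat, Nat.xor_assoc]

theorem zero_bxor (a : Int) : PySem.Int.bxor 0 a = a := by
  rw [PySem.Int.bxor_comm]; exact PySem.Int.bxor_zero a

theorem bxor_left_comm (a b c : Int) :
    PySem.Int.bxor a (PySem.Int.bxor b c) = PySem.Int.bxor b (PySem.Int.bxor a c) := by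
  rw [← bxor_assoc, PySem.Int.bxor_comm a b, bxor_assoc]

theorem bxor_four (a b c d : Int) :
    PySem.Int.bxor (PySem.Int.bxor a b) (PySem.Int.bxor c d) =
    PySem.Int.bxor (PySem.Int.bxor a c) (PySem.Int.bxor b d) := by
  rw [bxor_assoc, bxor_left_comm b c d, ← bxor_assoc]

-- the bit-split identity on Nat
theorem nat_bit_xor (m n a b : Nat) (ha : a ≤ 1) (hb : b ≤ 1) :
    (2 * m + a) ^^^ (2 * n + b) = 2 * (m ^^^ n) + (a ^^^ b) := by
  apply Nat.eq_of_testBit_eq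
  intro i
  cases i with
  | zero =>
    interval_cases a <;> interval_cases b <;>
      simp [Nat.testBit_zero, Nat.testBit_xor, Nat.mul_add_mod] <;> omega
  | succ j =>
    have h1 : (2 * m + a) / 2 = m := by omega
    have h2 : (2 * n + b) / 2 = n := by omega
    have h3 : (2 * (m ^^^ n) + (a ^^^ b)) / 2 = m ^^^ n := by
      interval_cases a <;> interval_cases b <;> simp <;> omega
    rw [Nat.testBit_xor, Nat.testBit_succ, Nat.testBit_succ, Nat.testBit_succ, h1, h2, h3]
    simp [Nat.testBit_xor]

theorem nx00 (m n : Nat) : (2 * m) ^^^ (2 * n) = 2 * (m ^^^ n) := by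
  have := nat_bit_xor m n 0 0 (by omega) (by omega); simpa using this
theorem nx01 (m n : Nat) : (2 * m) ^^^ (2 * n + 1) = 2 * (m ^^^ n) + 1 := by
  have := nat_bit_xor m n 0 1 (by omega) (by omega); simpa using this
theorem nx10 (m n : Nat) : (2 * m + 1) ^^^ (2 * n) = 2 * (m ^^^ n) + 1 := by
  have := nat_bit_xor m n 1 0 (by omega) (by omega); simpa using this
theorem nx11 (m n : Nat) : (2 * m + 1) ^^^ (2 * n + 1) = 2 * (m ^^^ n) := by
  have := nat_bit_xor m n 1 1 (by omega) (by omega); simpa using this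

-- canonical constructor forms of 2x + 0/1
theorem cn0 (p : Nat) : 2 * (p : Int) + 0 = ((2 * p : Nat) : Int) := by push_cast; ring
theorem cn1 (p : Nat) : 2 * (p : Int) + 1 = ((2 * p + 1 : Nat) : Int) := by push_cast; ring
theorem cs0 (p : Nat) : 2 * (Int.negSucc p) + 0 = Int.negSucc (2 * p + 1) := by
  rw [Int.negSucc_eq, Int.negSucc_eq]; push_cast; ring
theorem cs1 (p : Nat) : 2 * (Int.negSucc p) + 1 = Int.negSucc (2 * p) := by
  rw [Int.negSucc_eq, Int.negSucc_eq]; push_cast; ring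

theorem bl00 : PySem.Int.bxor 0 0 = 0 := by decide
theorem bl01 : PySem.Int.bxor 0 1 = 1 := by decide
theorem bl10 : PySem.Int.bxor 1 0 = 1 := by decide
theorem bl11 : PySem.Int.bxor 1 1 = 0 := by decide

-- the bit-split identity on Int (Python's infinite two's complement)
theorem bxor_bit (A B e1 e2 : Int) (h1 : e1 = 0 ∨ e1 = 1) (h2 : e2 = 0 ∨ e2 = 1) :
    PySem.Int.bxor (2 * A + e1) (2 * B + e2) =
    2 * PySem.Int.bxor A B + PySem.Int.bxor e1 e2 := by
  rcases h1 with h1 | h1 <;> rcases h2 with h2 | h2 <;> subst h1 <;> subst h2 <;>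
    rcases A with p | p <;> rcases B with q | q <;>
    simp only [Int.ofNat_eq_natCast, cn0, cn1, cs0, cs1, PySem.Int.bxor_natCast,
      bxor_ofNat_negSucc, bxor_negSucc_ofNat, bxor_negSucc_negSucc,
      nx00, nx01, nx10, nx11, bl00, bl01, bl10, bl11] <;>
    simp only [Int.negSucc_eq] <;> push_cast <;> omega

theorem bxor_ac4 (a b x y : Int) :
    PySem.Int.bxor a (PySem.Int.bxor b (PySem.Int.bxor x y)) =
    PySem.Int.bxor (PySem.Int.bxor a x) (PySem.Int.bxor b y) := by
  rw [bxor_left_comm b x y, ← bxor_assoc]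

-- XOR-fold of f over the AP c, c+d, …, c+(m-1)d (the common spec of both programs)
def foldAP (f : Int → Int) (c d : Int) : Nat → Int
  | 0 => 0
  | (m + 1) => PySem.Int.bxor (f c) (foldAP f (c + d) d m)

-- index-parity split of the fold, for any f
theorem foldAP_split (f : Int → Int) :
    ∀ m c d, foldAP f c d m =
      PySem.Int.bxor (foldAP f c (2 * d) ((m + 1) / 2)) (foldAP f (c + d) (2 * d) (m / 2)) := by
  intro m
  induction m using Nat.strong_induction_on with
  | _ m ih =>
    match m with
    | 0 => intro c d; simp [foldAP]
    | 1 => intro c d; simp [foldAP, PySem.Int.bxor_zero]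
    | (n + 2) =>
      intro c d
      have h1 : (n + 2 + 1) / 2 = (n + 1) / 2 + 1 := by omega
      have h2 : (n + 2) / 2 = n / 2 + 1 := by omega
      rw [h1, h2]
      show PySem.Int.bxor (f c) (foldAP f (c + d) d (n + 1)) = _
      rw [show foldAP f (c + d) d (n + 1) =
            PySem.Int.bxor (f (c + d)) (foldAP f (c + d + d) d n) from rfl]
      rw [ih n (by omega) (c + d + d) d]
      rw [show foldAP f c (2 * d) ((n + 1) / 2 + 1) =
            PySem.Int.bxor (f c) (foldAP f (c + 2 * d) (2 * d) ((n + 1) / 2)) from rfl]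
      rw [show foldAP f (c + d) (2 * d) (n / 2 + 1) =
            PySem.Int.bxor (f (c + d)) (foldAP f (c + d + 2 * d) (2 * d) (n / 2)) from rfl]
      rw [show c + d + d = c + 2 * d by ring]
      rw [show c + 2 * d + d = c + d + 2 * d by ring]
      exact bxor_ac4 _ _ _ _

-- the low-bit peel of the fold of id over an even-step AP
theorem foldAP_half (m : Nat) : ∀ (c d : Int), d % 2 = 0 →
    foldAP id c d m =
      2 * foldAP id (c / 2) (d / 2) m + (c % 2) * ((m % 2 : Nat) : Int) := by
  induction m with
  | zero => intro c d _; simp [foldAP]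
  | succ k ih =>
    intro c d hd
    have hsplit : foldAP id c d (k + 1) = PySem.Int.bxor c (foldAP id (c + d) d k) := rfl
    rw [hsplit, ih (c + d) d hd]
    have e1 : (c + d) % 2 = c % 2 := by omega
    have e2 : (c + d) / 2 = c / 2 + d / 2 := by omega
    rw [e1, e2]
    have hc : (2 : Int) * (c / 2) + c % 2 = c := by omega
    have hb := bxor_bit (c / 2) (foldAP id (c / 2 + d / 2) (d / 2) k)
      (c % 2) ((c % 2) * ((k % 2 : Nat) : Int)) (by omega)
      (by rcases (by omega : c % 2 = 0 ∨ c % 2 = 1) with h | h <;> rw [h] <;> omega)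
    rw [hc] at hb
    rw [hb]
    rw [show foldAP id (c / 2) (d / 2) (k + 1) =
          PySem.Int.bxor (c / 2) (foldAP id (c / 2 + d / 2) (d / 2) k) from rfl]
    congr 1
    rcases (by omega : c % 2 = 0 ∨ c % 2 = 1) with h | h <;>
      rcases (by omega : k % 2 = 0 ∨ k % 2 = 1) with hk | hk <;>
      rw [h] <;>
      simp [hk, Nat.add_mod, bl00, bl01, bl10, bl11, PySem.Int.bxor_zero, zero_bxor,
        PySem.Int.bxor_self]

-- fold of id over a constant AP (step 0)
theorem foldAP_const (m : Nat) : ∀ c : Int,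
    foldAP id c 0 m = if m % 2 = 1 then c else 0 := by
  induction m with
  | zero => intro c; simp [foldAP]
  | succ k ih =>
    intro c
    rw [show foldAP id c 0 (k + 1) = PySem.Int.bxor c (foldAP id (c + 0) 0 k) from rfl]
    rw [add_zero, ih c]
    rcases (by omega : k % 2 = 0 ∨ k % 2 = 1) with h | h <;>
      simp [h, Nat.add_mod, PySem.Int.bxor_zero, PySem.Int.bxor_self] <;> omega

-- apXor computes the fold of id
theorem apXor_correct (c d m : Int) : apXor c d m = foldAP id c d m.toNat := by
  induction c, d, m using apXor.induct with
  | case1 c d m h =>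
    rw [apXor]
    simp [h, show m.toNat = 0 by omega, foldAP]
  | case2 c d =>
    rw [apXor]
    norm_num
    show (c : Int) = foldAP id c d 1
    rw [show foldAP id c d 1 = PySem.Int.bxor c (foldAP id (c + d) d 0) from rfl]
    simp [foldAP, PySem.Int.bxor_zero]
  | case3 c m h1 h2 h3 =>
    rw [apXor]
    simp only [h1, h2, h3, if_true, if_false, if_neg, ite_true, ite_false]
    rw [foldAP_const m.toNat c]
    rw [pymod_two] at h3
    rw [if_pos (by omega : m.toNat % 2 = 1)]
  | case4 c m h1 h2 h3 =>
    rw [apXor]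
    simp only [h1, h2, h3, if_true, if_false, if_neg, ite_true, ite_false]
    rw [foldAP_const m.toNat c]
    rw [pymod_two] at h3
    rw [if_neg (by omega : ¬ m.toNat % 2 = 1)]
  | case5 c d m h1 h2 h3 h4 ih2 ih1 =>
    rw [apXor]
    simp only [h1, h2, h3, h4, if_true, if_false, ite_true, ite_false]
    rw [ih1, ih2, foldAP_split id m.toNat c d]
    congr 2 <;> rw [pyfd_two] <;> omega
  | case6 c d m h1 h2 h3 h4 ih =>
    rw [apXor]
    simp only [h1, h2, h3, h4, if_true, if_false, ite_true, ite_false]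
    rw [ih, foldAP_half m.toNat c d (by rw [pymod_two] at h4; omega)]
    rw [pyfd_two, pyfd_two, pymod_two, pymod_two]
    congr 1
    rw [show ((m.toNat % 2 : Nat) : Int) = m % 2 by omega]

-- fastXor evaluated on each residue class mod 4
theorem fastXor_eval0 (n : Int) (h : n % 4 = 0) : fastXor n = n := by
  simp [fastXor, pymod_four, h]
theorem fastXor_eval1 (n : Int) (h : n % 4 = 1) : fastXor n = 1 := by
  simp [fastXor, pymod_four, h]
theorem fastXor_eval2 (n : Int) (h : n % 4 = 2) : fastXor n = n + 1 := by
  simp [fastXor, pymod_four, h]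
theorem fastXor_eval3 (n : Int) (h : n % 4 = 3) : fastXor n = 0 := by
  simp [fastXor, pymod_four, h]

-- the fastXor-fold over a step-divisible-by-4 AP, by residue class of c mod 4
theorem foldAP_fx0 (k : Nat) : ∀ c d : Int, d % 4 = 0 → c % 4 = 0 →
    foldAP fastXor c d k = foldAP id c d k := by
  induction k with
  | zero => intro c d _ _; rfl
  | succ n ih =>
    intro c d hd hc
    show PySem.Int.bxor (fastXor c) (foldAP fastXor (c + d) d n) = _
    rw [fastXor_eval0 c hc, ih (c + d) d hd (by omega)]
    rfl

theorem foldAP_fx1 (k : Nat) : ∀ c d : Int, d % 4 = 0 → c % 4 = 1 →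
    foldAP fastXor c d k = if k % 2 = 1 then 1 else 0 := by
  induction k with
  | zero => intro c d _ _; rfl
  | succ n ih =>
    intro c d hd hc
    show PySem.Int.bxor (fastXor c) (foldAP fastXor (c + d) d n) = _
    rw [fastXor_eval1 c hc, ih (c + d) d hd (by omega)]
    rcases (by omega : n % 2 = 0 ∨ n % 2 = 1) with h | h <;>
      simp [h, Nat.add_mod, PySem.Int.bxor_zero, bl11]

theorem foldAP_fx2 (k : Nat) : ∀ c d : Int, d % 4 = 0 → c % 4 = 2 →
    foldAP fastXor c d k = foldAP id (c + 1) d k := by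
  induction k with
  | zero => intro c d _ _; rfl
  | succ n ih =>
    intro c d hd hc
    show PySem.Int.bxor (fastXor c) (foldAP fastXor (c + d) d n) = _
    rw [fastXor_eval2 c hc, ih (c + d) d hd (by omega)]
    rw [show foldAP id (c + 1) d (n + 1) =
          PySem.Int.bxor (c + 1) (foldAP id (c + 1 + d) d n) from rfl]
    rw [show c + d + 1 = c + 1 + d by ring]

theorem foldAP_fx3 (k : Nat) : ∀ c d : Int, d % 4 = 0 → c % 4 = 3 →
    foldAP fastXor c d k = 0 := by
  induction k with
  | zero => intro c d _ _; rfl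
  | succ n ih =>
    intro c d hd hc
    show PySem.Int.bxor (fastXor c) (foldAP fastXor (c + d) d n) = _
    rw [fastXor_eval3 c hc, ih (c + d) d hd (by omega), bl00]

-- fxorAp computes the fastXor-fold
theorem fxorAp_correct (c d m : Int) : fxorAp c d m = foldAP fastXor c d m.toNat := by
  induction c, d, m using fxorAp.induct with
  | case1 c d m h =>
    rw [fxorAp]
    simp [h, show m.toNat = 0 by omega, foldAP]
  | case2 c d m h1 h2 md h3 =>
    have h3' : PySem.Int.mod c 4 = 0 := h3
    rw [fxorAp]
    simp only [if_neg h1, if_pos h2, if_pos h3']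
    rw [apXor_correct, foldAP_fx0 m.toNat c d (by rw [pymod_four] at h2; omega)
      (by rw [pymod_four] at h3'; omega)]
  | case3 c d m h1 h2 md h3 h4 =>
    have h3' : ¬ PySem.Int.mod c 4 = 0 := h3
    have h4' : PySem.Int.mod c 4 = 1 := h4
    rw [fxorAp]
    simp only [if_neg h1, if_pos h2, if_neg h3', if_pos h4']
    rw [foldAP_fx1 m.toNat c d (by rw [pymod_four] at h2; omega)
      (by rw [pymod_four] at h4'; omega)]
    rw [pymod_two]
    split_ifs with h <;> omega
  | case4 c d m h1 h2 md h3 h4 h5 =>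
    have h3' : ¬ PySem.Int.mod c 4 = 0 := h3
    have h4' : ¬ PySem.Int.mod c 4 = 1 := h4
    have h5' : PySem.Int.mod c 4 = 2 := h5
    rw [fxorAp]
    simp only [if_neg h1, if_pos h2, if_neg h3', if_neg h4', if_pos h5']
    rw [apXor_correct, foldAP_fx2 m.toNat c d (by rw [pymod_four] at h2; omega)
      (by rw [pymod_four] at h5'; omega)]
  | case5 c d m h1 h2 md h3 h4 h5 =>
    have h3' : ¬ PySem.Int.mod c 4 = 0 := h3
    have h4' : ¬ PySem.Int.mod c 4 = 1 := h4
    have h5' : ¬ PySem.Int.mod c 4 = 2 := h5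
    rw [fxorAp]
    simp only [if_neg h1, if_pos h2, if_neg h3', if_neg h4', if_neg h5']
    rw [foldAP_fx3 m.toNat c d (by rw [pymod_four] at h2; omega)
      (by rw [pymod_four] at h3' h4' h5'; omega)]
  | case6 c d m h1 h2 ih2 ih1 =>
    rw [fxorAp]
    simp only [if_neg h1, if_neg h2]
    rw [ih1, ih2, foldAP_split fastXor m.toNat c d]
    congr 2 <;> rw [pyfd_two] <;> omega

-- A's loop accumulates res XOR the fastXor-folds over the two boundary APs
theorem loopA_eq (n : Nat) : ∀ (length res start current_row : Int),
    current_row = (n : Int) →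
    solutionLoopA length res start current_row =
      PySem.Int.bxor res
        (PySem.Int.bxor (foldAP fastXor (start - 1) length n)
          (foldAP fastXor (start + current_row - 1) (length - 1) n)) := by
  induction n with
  | zero =>
    intro length res start current_row hc
    rw [solutionLoopA]
    simp [hc, foldAP, bl00, PySem.Int.bxor_zero]
  | succ n ih =>
    intro length res start current_row hc
    rw [solutionLoopA]
    rw [if_pos (by omega : (0 : Int) < current_row)]
    rw [ih length _ (start + length) (current_row - 1) (by omega)]
    rw [show foldAP fastXor (start - 1) length (n + 1) =
          PySem.Int.bxor (fastXor (start - 1)) (foldAP fastXor (start - 1 + length) length n)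
        from rfl]
    rw [show foldAP fastXor (start + current_row - 1) (length - 1) (n + 1) =
          PySem.Int.bxor (fastXor (start + current_row - 1))
            (foldAP fastXor (start + current_row - 1 + (length - 1)) (length - 1) n)
        from rfl]
    rw [show start - 1 + length = start + length - 1 by ring]
    rw [show start + current_row - 1 + (length - 1) = start + length + (current_row - 1) - 1 by ring]
    rw [bxor_assoc, bxor_four]

-- ===== VERDICT (by name: the statement is the Claim_ definition above) =====
theorem solution_spec : Claim_equal_solution := by
  intro start length _
  unfold Spec_solution solution solution_alt
  by_cases h : 0 < length
  · rw [loopA_eq length.toNat length 0 start length (by omega)]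
    rw [fxorAp_correct, fxorAp_correct, zero_bxor]
  · rw [solutionLoopA, if_neg (by omega : ¬ (0 : Int) < length)]
    rw [fxorAp, if_pos (by omega : length ≤ 0)]
    rw [fxorAp, if_pos (by omega : length ≤ 0)]
    rw [bl00]
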